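-- pv_equiv track=rewrite | github.com/WorryingWonton/PyBats | string_3.py | notReplace
-- ===== SOURCE A (Python) =====
-- def notReplace(str1):
--     idx = 0
--     while idx < len(str1) - 1:
--         if str1[idx:idx + 2] == 'is' and (len(str1) == 2 or (((idx == 0 and not str1[idx + 2].isalpha()) or (idx == len(str1) - 2 and not str1[idx - 1].isalpha())) or (not str1[idx - 1].isalpha() and not str1[idx + 2].isalpha()))):
--             str1 = str1[0:idx + 2] + ' not' + str1[idx + 2:]
--             idx += 6
--         else:
--             idx += 1
--     return str1
-- ===== SOURCE B (Python) =====
-- def notReplace(str1):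
--     runs = []
--     cur = ''
--     for ch in str1:
--         if cur and cur[0].isalpha() == ch.isalpha():
--             cur += ch
--         else:
--             if cur:
--                 runs.append(cur)
--             cur = ch
--     if cur:
--         runs.append(cur)
--     return ''.join('is not' if r == 'is' else r for r in runs)
-- ===== Notes on version B (the rewrite author's own statement) =====
-- stated objective: simpler
-- what changed: B replaces A's in-place while-loop with index arithmetic, 2-char slicing, boundary tests and string splicing by a tokenize-then-map pass: group the characters into maximal runs of equal isalpha() status, map the run 'is' to 'is not', and join.
import Mathlib
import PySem

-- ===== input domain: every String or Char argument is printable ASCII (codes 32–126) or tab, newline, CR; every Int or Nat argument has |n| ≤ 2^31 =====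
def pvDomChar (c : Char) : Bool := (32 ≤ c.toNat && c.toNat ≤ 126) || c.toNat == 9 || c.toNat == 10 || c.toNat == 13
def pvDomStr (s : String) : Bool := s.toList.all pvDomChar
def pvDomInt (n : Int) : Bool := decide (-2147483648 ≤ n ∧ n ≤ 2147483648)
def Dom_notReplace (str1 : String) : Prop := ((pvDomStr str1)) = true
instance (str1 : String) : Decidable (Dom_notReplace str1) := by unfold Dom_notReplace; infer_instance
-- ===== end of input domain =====

-- B replaces A's index-arithmetic splicing loop by tokenize-then-map over maximal isalpha runs (simpler decomposition).


-- ===== PORT A =====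
-- total form of str1[i]: the default ' ' is only read at i = len(s), inside a conjunction whose
-- truth value Python decides without that operand (short-circuit); ' ' is non-alpha, so the
-- whole condition has exactly Python's value.
def pvCharAt (s : List Char) (i : Int) : Char := PySem.List.pyGetD s i ' '

def notReplaceLoop (s : List Char) (idx : Nat) : List Char :=
  if h : (idx : Int) < (s.length : Int) - 1 then
    if (PySem.List.slice s (some (idx : Int)) (some ((idx : Int) + 2)) = ['i', 's']) ∧
        (s.length = 2 ∨
          (((idx = 0 ∧ ¬ (PySem.Chars.isalpha (pvCharAt s ((idx : Int) + 2)) = true)) ∨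
             ((idx : Int) = (s.length : Int) - 2 ∧ ¬ (PySem.Chars.isalpha (pvCharAt s ((idx : Int) - 1)) = true))) ∨
           (¬ (PySem.Chars.isalpha (pvCharAt s ((idx : Int) - 1)) = true) ∧
            ¬ (PySem.Chars.isalpha (pvCharAt s ((idx : Int) + 2)) = true)))) then
      notReplaceLoop
        (PySem.List.slice s (some 0) (some ((idx : Int) + 2)) ++ (' ' :: 'n' :: 'o' :: 't' :: []) ++
          PySem.List.slice s (some ((idx : Int) + 2)) none)
        (idx + 6)
    else
      notReplaceLoop s (idx + 1)
  else s
termination_by s.length + 1 - idx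
decreasing_by
  · have h2 : (idx : Int) + 2 = ((idx + 2 : Nat) : Int) := by push_cast; ring
    simp only [PySem.List.slice_zero_start, h2, PySem.List.slice_to_natCast,
      PySem.List.slice_from_natCast, List.length_append, List.length_take, List.length_drop,
      List.length_cons, List.length_nil]
    omega
  · omega

def notReplace (str1 : String) : String := String.ofList (notReplaceLoop str1.toList 0)

-- ===== PORT B =====
def pvRunStep (st : List (List Char) × List Char) (ch : Char) : List (List Char) × List Char :=
  if st.2 ≠ [] ∧ PySem.Chars.isalpha (st.2.headD ' ') = PySem.Chars.isalpha ch then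
    (st.1, st.2 ++ [ch])
  else
    ((if st.2 ≠ [] then st.1 ++ [st.2] else st.1), [ch])

def pvMapRun (r : List Char) : List Char :=
  if r = ['i', 's'] then ('i' :: 's' :: ' ' :: 'n' :: 'o' :: 't' :: []) else r

def notReplace_alt (str1 : String) : String :=
  let st := str1.toList.foldl pvRunStep ([], [])
  let runs := if st.2 ≠ [] then st.1 ++ [st.2] else st.1
  String.ofList ((runs.map pvMapRun).flatten)

-- ===== PRECONDITION & SPEC =====
def Spec_notReplace (str1 : String) (out : String) : Prop := out = notReplace_alt str1
instance (str1 : String) (out : String) : Decidable (Spec_notReplace str1 out) := by unfold Spec_notReplace; infer_instance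

-- ===== CLAIM (what is proved, stated in full; the proofs are below) =====
def Claim_equal_notReplace : Prop := ∀ (str1 : String), Dom_notReplace str1 → Spec_notReplace str1 (notReplace str1)

-- ===== LEMMAS AND PROOFS =====

-- isalpha status of the last character of the processed prefix (false for the empty prefix)
def pvAlphaLast (done : List Char) : Bool :=
  match done.getLast? with
  | none => false
  | some c => PySem.Chars.isalpha c

-- isalpha status of the head (false for [])
def pvNhd (cs : List Char) : Bool :=
  match cs with
  | [] => false
  | c :: _ => PySem.Chars.isalpha c

-- reference scan: one pass, knowing whether the previous character is alphabetic
def pvScan (prev : Bool) : List Char → List Char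
  | [] => []
  | [a] => [a]
  | a :: b :: rest =>
    if a = 'i' ∧ b = 's' ∧ prev = false ∧ pvNhd rest = false then
      'i' :: 's' :: ' ' :: 'n' :: 'o' :: 't' :: pvScan true rest
    else
      a :: pvScan (PySem.Chars.isalpha a) (b :: rest)

-- maximal runs of equal isalpha status, recursively
def pvRunsRec : List Char → List (List Char)
  | [] => []
  | a :: cs =>
    (a :: cs.takeWhile (fun d => PySem.Chars.isalpha d == PySem.Chars.isalpha a)) ::
      pvRunsRec (cs.dropWhile (fun d => PySem.Chars.isalpha d == PySem.Chars.isalpha a))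
termination_by cs => cs.length
decreasing_by
  have := List.length_dropWhile_le (p := fun d => PySem.Chars.isalpha d == PySem.Chars.isalpha a) (l := cs)
  simp; omega

-- the fold of pvRunStep, unrolled as recursion on the input
def pvRunsFrom (cur : List Char) : List Char → List (List Char)
  | [] => [cur]
  | c :: cs =>
    if PySem.Chars.isalpha (cur.headD ' ') = PySem.Chars.isalpha c then
      pvRunsFrom (cur ++ [c]) cs
    else
      cur :: pvRunsFrom [c] cs

def pvFinish (st : List (List Char) × List Char) : List (List Char) :=
  if st.2 ≠ [] then st.1 ++ [st.2] else st.1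

lemma pvFoldEq (cs : List Char) : ∀ (runs : List (List Char)) (cur : List Char), cur ≠ [] →
    pvFinish (List.foldl pvRunStep (runs, cur) cs) = runs ++ pvRunsFrom cur cs := by
  induction cs with
  | nil => intro runs cur h; simp [pvFinish, pvRunsFrom, h]
  | cons c cs ih =>
    intro runs cur h
    simp only [List.foldl_cons, pvRunsFrom]
    by_cases hc : PySem.Chars.isalpha (cur.headD ' ') = PySem.Chars.isalpha c
    · rw [if_pos hc]
      have hstep : pvRunStep (runs, cur) c = (runs, cur ++ [c]) := by
        unfold pvRunStep; rw [if_pos ⟨h, hc⟩]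
      rw [hstep, ih runs (cur ++ [c]) (by simp)]
    · rw [if_neg hc]
      have hstep : pvRunStep (runs, cur) c = (runs ++ [cur], [c]) := by
        unfold pvRunStep; rw [if_neg (fun hcon => hc hcon.2), if_pos h]
      rw [hstep, ih (runs ++ [cur]) [c] (by simp)]
      simp

lemma pvRunsFromEq (cs : List Char) : ∀ (cur : List Char), cur ≠ [] →
    pvRunsFrom cur cs =
      (cur ++ cs.takeWhile (fun d => PySem.Chars.isalpha d == PySem.Chars.isalpha (cur.headD ' '))) ::
        pvRunsRec (cs.dropWhile (fun d => PySem.Chars.isalpha d == PySem.Chars.isalpha (cur.headD ' '))) := by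
  induction cs with
  | nil => intro cur h; simp [pvRunsFrom, pvRunsRec]
  | cons c cs ih =>
    intro cur h
    simp only [pvRunsFrom]
    by_cases hc : PySem.Chars.isalpha (cur.headD ' ') = PySem.Chars.isalpha c
    · rw [if_pos hc]
      rw [ih (cur ++ [c]) (by simp)]
      have hh : (cur ++ [c]).headD ' ' = cur.headD ' ' := by
        cases cur with
        | nil => exact absurd rfl h
        | cons x xs => rfl
      rw [hh]
      have hpc : (PySem.Chars.isalpha c == PySem.Chars.isalpha (cur.headD ' ')) = true :=
        beq_iff_eq.mpr hc.symm
      rw [List.takeWhile_cons_of_pos (p := fun d => PySem.Chars.isalpha d == PySem.Chars.isalpha (cur.headD ' ')) hpc,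
        List.dropWhile_cons_of_pos (p := fun d => PySem.Chars.isalpha d == PySem.Chars.isalpha (cur.headD ' ')) hpc]
      simp
    · rw [if_neg hc]
      have hpc : ¬ ((PySem.Chars.isalpha c == PySem.Chars.isalpha (cur.headD ' ')) = true) := by
        simp only [beq_iff_eq]; exact fun e => hc e.symm
      rw [List.takeWhile_cons_of_neg (p := fun d => PySem.Chars.isalpha d == PySem.Chars.isalpha (cur.headD ' ')) hpc,
        List.dropWhile_cons_of_neg (p := fun d => PySem.Chars.isalpha d == PySem.Chars.isalpha (cur.headD ' ')) hpc]
      rw [ih [c] (by simp)]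
      simp [pvRunsRec]

lemma pvAltEq (cs : List Char) :
    pvFinish (List.foldl pvRunStep ([], []) cs) = pvRunsRec cs := by
  cases cs with
  | nil => simp [pvFinish, pvRunsRec]
  | cons c cs =>
    have h0 : pvRunStep ([], []) c = ([], [c]) := by unfold pvRunStep; simp
    simp only [List.foldl_cons, h0]
    rw [pvFoldEq cs [] [c] (by simp), pvRunsFromEq cs [c] (by simp)]
    simp [pvRunsRec]

lemma pvScanTrueAux : ∀ (n : Nat) (cs : List Char), cs.length ≤ n →
    pvScan true cs =
      cs.takeWhile PySem.Chars.isalpha ++ pvScan false (cs.dropWhile PySem.Chars.isalpha) := by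
  intro n
  induction n with
  | zero =>
    intro cs hl
    have : cs = [] := List.eq_nil_of_length_eq_zero (by omega)
    subst this; simp [pvScan]
  | succ n ih =>
    intro cs hl
    rcases cs with _ | ⟨a, _ | ⟨b, rest⟩⟩
    · simp [pvScan]
    · by_cases ha : PySem.Chars.isalpha a = true
      · rw [List.takeWhile_cons_of_pos ha, List.dropWhile_cons_of_pos ha]; simp [pvScan]
      · rw [List.takeWhile_cons_of_neg ha, List.dropWhile_cons_of_neg ha]; simp [pvScan]
    · have h1 : pvScan true (a :: b :: rest) = a :: pvScan (PySem.Chars.isalpha a) (b :: rest) := by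
        simp only [pvScan]; rw [if_neg (by rintro ⟨-, -, h, -⟩; cases h)]
      by_cases ha : PySem.Chars.isalpha a = true
      · rw [h1, ha, ih (b :: rest) (by simp at hl ⊢; omega)]
        rw [List.takeWhile_cons_of_pos ha, List.dropWhile_cons_of_pos ha]
        simp
      · have hai : a ≠ 'i' := fun e => ha (by rw [e]; decide)
        have h2 : pvScan false (a :: b :: rest) = a :: pvScan (PySem.Chars.isalpha a) (b :: rest) := by
          simp only [pvScan]; rw [if_neg (by tauto)]
        rw [List.takeWhile_cons_of_neg ha, List.dropWhile_cons_of_neg ha]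
        rw [h1, h2]; simp

lemma pvScanTrue (cs : List Char) :
    pvScan true cs =
      cs.takeWhile PySem.Chars.isalpha ++ pvScan false (cs.dropWhile PySem.Chars.isalpha) :=
  pvScanTrueAux cs.length cs le_rfl

-- prepending a non-alpha character commutes with the run decomposition
lemma pvConsNonalpha (a : Char) (cs : List Char) (ha : ¬ PySem.Chars.isalpha a = true) :
    ((pvRunsRec (a :: cs)).map pvMapRun).flatten = a :: ((pvRunsRec cs).map pvMapRun).flatten := by
  have ha' : PySem.Chars.isalpha a = false := by simpa using ha
  rcases cs with _ | ⟨b, rest⟩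
  · simp [pvRunsRec, pvMapRun]
  · by_cases hb : PySem.Chars.isalpha b = true
    · have hpb : ¬ ((PySem.Chars.isalpha b == PySem.Chars.isalpha a) = true) := by simp [hb, ha']
      simp only [pvRunsRec]
      rw [List.takeWhile_cons_of_neg (p := fun d => PySem.Chars.isalpha d == PySem.Chars.isalpha a) hpb, List.dropWhile_cons_of_neg (p := fun d => PySem.Chars.isalpha d == PySem.Chars.isalpha a) hpb]
      simp [pvMapRun, pvRunsRec]
    · have hb' : PySem.Chars.isalpha b = false := by simpa using hb
      have hpb : (PySem.Chars.isalpha b == PySem.Chars.isalpha a) = true := by simp [hb', ha']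
      simp only [pvRunsRec]
      rw [List.takeWhile_cons_of_pos (p := fun d => PySem.Chars.isalpha d == PySem.Chars.isalpha a) hpb, List.dropWhile_cons_of_pos (p := fun d => PySem.Chars.isalpha d == PySem.Chars.isalpha a) hpb]
      simp only [ha', hb']
      have hfa : pvMapRun (a :: b :: List.takeWhile (fun d => !PySem.Chars.isalpha d) rest)
          = a :: b :: List.takeWhile (fun d => !PySem.Chars.isalpha d) rest := by
        unfold pvMapRun
        rw [if_neg]
        intro e
        simp only [List.cons.injEq] at e
        exact ha (by rw [e.1]; decide)
      have hfb : pvMapRun (b :: List.takeWhile (fun d => !PySem.Chars.isalpha d) rest)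
          = b :: List.takeWhile (fun d => !PySem.Chars.isalpha d) rest := by
        unfold pvMapRun
        rw [if_neg]
        intro e
        simp only [List.cons.injEq] at e
        exact hb (by rw [e.1]; decide)
      simp [hfa, hfb]

lemma pvScanFalseAux : ∀ (n : Nat) (cs : List Char), cs.length ≤ n →
    pvScan false cs = ((pvRunsRec cs).map pvMapRun).flatten := by
  intro n
  induction n with
  | zero =>
    intro cs hl
    have : cs = [] := List.eq_nil_of_length_eq_zero (by omega)
    subst this; simp [pvScan, pvRunsRec]
  | succ n ih =>
    intro cs hl
    rcases cs with _ | ⟨a, _ | ⟨b, rest⟩⟩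
    · simp [pvScan, pvRunsRec]
    · simp [pvScan, pvRunsRec, pvMapRun]
    · by_cases ha : PySem.Chars.isalpha a = true
      · by_cases hsc : a = 'i' ∧ b = 's' ∧ pvNhd rest = false
        · obtain ⟨ea, eb, hn⟩ := hsc; subst ea; subst eb
          have h1 : pvScan false ('i' :: 's' :: rest) =
              'i' :: 's' :: ' ' :: 'n' :: 'o' :: 't' :: pvScan true rest := by
            simp only [pvScan]; rw [if_pos ⟨by trivial, by trivial, by trivial, hn⟩]
          have h2 : pvScan true rest = pvScan false rest := by
            cases rest with
            | nil => simp [pvScan]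
            | cons c r =>
              have hc : ¬ (PySem.Chars.isalpha c = true) := by simp [pvNhd] at hn; simp [hn]
              rw [pvScanTrue (c :: r), List.takeWhile_cons_of_neg hc, List.dropWhile_cons_of_neg hc]
              simp
          have hr : pvRunsRec ('i' :: 's' :: rest) = ['i', 's'] :: pvRunsRec rest := by
            simp only [pvRunsRec]
            have hps : (PySem.Chars.isalpha 's' == PySem.Chars.isalpha 'i') = true := by decide
            rw [List.takeWhile_cons_of_pos (p := fun d => PySem.Chars.isalpha d == PySem.Chars.isalpha 'i') hps, List.dropWhile_cons_of_pos (p := fun d => PySem.Chars.isalpha d == PySem.Chars.isalpha 'i') hps]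
            cases rest with
            | nil => simp
            | cons c r =>
              have hc : PySem.Chars.isalpha c = false := by simpa [pvNhd] using hn
              have hpc : ¬ ((PySem.Chars.isalpha c == PySem.Chars.isalpha 'i') = true) := by
                simp [hc]; decide
              rw [List.takeWhile_cons_of_neg (p := fun d => PySem.Chars.isalpha d == PySem.Chars.isalpha 'i') hpc, List.dropWhile_cons_of_neg (p := fun d => PySem.Chars.isalpha d == PySem.Chars.isalpha 'i') hpc]
          rw [h1, h2, ih rest (by simp at hl; omega), hr]
          simp [pvMapRun]
        · have h1 : pvScan false (a :: b :: rest) =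
              a :: pvScan (PySem.Chars.isalpha a) (b :: rest) := by
            simp only [pvScan]; rw [if_neg (by tauto)]
          rw [h1, ha, pvScanTrue (b :: rest)]
          rw [ih ((b :: rest).dropWhile PySem.Chars.isalpha)
            (by have := List.length_dropWhile_le (p := PySem.Chars.isalpha) (l := b :: rest);
                simp at hl this ⊢; omega)]
          have hr : pvRunsRec (a :: b :: rest) =
              (a :: (b :: rest).takeWhile PySem.Chars.isalpha) ::
                pvRunsRec ((b :: rest).dropWhile PySem.Chars.isalpha) := by
            simp [pvRunsRec, ha]
          rw [hr]
          have hf : pvMapRun (a :: (b :: rest).takeWhile PySem.Chars.isalpha) =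
              a :: (b :: rest).takeWhile PySem.Chars.isalpha := by
            unfold pvMapRun
            rw [if_neg]
            intro e
            simp only [List.cons.injEq] at e
            obtain ⟨ea, et⟩ := e
            by_cases hb : PySem.Chars.isalpha b = true
            · rw [List.takeWhile_cons_of_pos hb] at et
              simp only [List.cons.injEq] at et
              obtain ⟨eb, etw⟩ := et
              have hnr : pvNhd rest = false := by
                cases rest with
                | nil => rfl
                | cons c r =>
                  by_cases hcr : PySem.Chars.isalpha c = true
                  · rw [List.takeWhile_cons_of_pos hcr] at etw; cases etw
                  · simpa [pvNhd] using hcr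
              exact hsc ⟨ea, eb, hnr⟩
            · rw [List.takeWhile_cons_of_neg hb] at et; cases et
          simp [hf]
      · have h2 : pvScan false (a :: b :: rest) =
            a :: pvScan (PySem.Chars.isalpha a) (b :: rest) := by
          have hai : a ≠ 'i' := fun e => ha (by rw [e]; decide)
          simp only [pvScan]; rw [if_neg (by tauto)]
        have ha' : PySem.Chars.isalpha a = false := by simpa using ha
        rw [h2, ha', ih (b :: rest) (by simp at hl ⊢; omega)]
        exact (pvConsNonalpha a (b :: rest) ha).symm

lemma pvScanFalse (cs : List Char) :
    pvScan false cs = ((pvRunsRec cs).map pvMapRun).flatten :=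
  pvScanFalseAux cs.length cs le_rfl

-- ===== A-side: charAt evaluations =====
lemma pvCharAt_prev (done cs : List Char) (hd : done ≠ []) :
    pvCharAt (done ++ cs) ((done.length : Int) - 1) = done.getLast hd := by
  have hdl : 0 < done.length := List.length_pos_iff.mpr hd
  have h1 : (done.length : Int) - 1 = ((done.length - 1 : Nat) : Int) := by omega
  unfold pvCharAt
  rw [h1, PySem.List.pyGetD_natCast]
  unfold List.getD
  rw [List.getElem?_append_left (by omega)]
  rw [← List.getLast?_eq_getElem?, List.getLast?_eq_some_getLast hd]
  rfl

lemma pvCharAt_next (done : List Char) (a b c : Char) (r : List Char) :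
    pvCharAt (done ++ a :: b :: c :: r) ((done.length : Int) + 2) = c := by
  have h2 : (done.length : Int) + 2 = ((done.length + 2 : Nat) : Int) := by push_cast; ring
  unfold pvCharAt
  rw [h2, PySem.List.pyGetD_natCast]
  unfold List.getD
  rw [List.getElem?_append_right (by omega)]
  have h3 : done.length + 2 - done.length = 2 := by omega
  rw [h3]
  rfl

lemma pvCharAt_end (done : List Char) (a b : Char) :
    pvCharAt (done ++ [a, b]) ((done.length : Int) + 2) = ' ' := by
  have h2 : (done.length : Int) + 2 = ((done.length + 2 : Nat) : Int) := by push_cast; ring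
  unfold pvCharAt
  rw [h2, PySem.List.pyGetD_natCast]
  unfold List.getD
  rw [List.getElem?_eq_none (by simp)]
  rfl

lemma pvAlphaLast_ne (done : List Char) (hd : done ≠ []) :
    pvAlphaLast done = PySem.Chars.isalpha (done.getLast hd) := by
  unfold pvAlphaLast
  rw [List.getLast?_eq_some_getLast hd]

lemma pvAlphaLast_append (done l : List Char) (h : l ≠ []) :
    pvAlphaLast (done ++ l) = pvAlphaLast l := by
  unfold pvAlphaLast
  rw [List.getLast?_append_of_ne_nil done h]

-- A's boundary condition, evaluated: standalone-ness of the bigram at the junction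
lemma pvOrIff (done : List Char) (a b : Char) (rest : List Char) :
    ((done ++ a :: b :: rest).length = 2 ∨
      (((done.length = 0 ∧
          ¬ (PySem.Chars.isalpha (pvCharAt (done ++ a :: b :: rest) ((done.length : Int) + 2)) = true)) ∨
         ((done.length : Int) = ((done ++ a :: b :: rest).length : Int) - 2 ∧
          ¬ (PySem.Chars.isalpha (pvCharAt (done ++ a :: b :: rest) ((done.length : Int) - 1)) = true))) ∨
       (¬ (PySem.Chars.isalpha (pvCharAt (done ++ a :: b :: rest) ((done.length : Int) - 1)) = true) ∧
        ¬ (PySem.Chars.isalpha (pvCharAt (done ++ a :: b :: rest) ((done.length : Int) + 2)) = true)))) ↔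
    (pvAlphaLast done = false ∧ pvNhd rest = false) := by
  by_cases hd : done = []
  · subst hd
    cases rest with
    | nil => simp [pvAlphaLast, pvNhd]
    | cons c r =>
      have hc2 : pvCharAt ([] ++ a :: b :: c :: r) ((List.length ([] : List Char) : Int) + 2) = c :=
        pvCharAt_next [] a b c r
      simp only [List.nil_append, List.length_nil, Nat.cast_zero, zero_add] at hc2 ⊢
      rw [hc2]
      constructor
      · rintro (hlen | ((⟨-, hc⟩ | ⟨hlen2, -⟩) | ⟨-, hc⟩))
        · exfalso; simp at hlen
        · exact ⟨rfl, by simpa [pvNhd] using hc⟩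
        · exfalso; simp at hlen2; omega
        · exact ⟨rfl, by simpa [pvNhd] using hc⟩
      · rintro ⟨-, hN⟩
        exact Or.inr (Or.inl (Or.inl ⟨by trivial, by simpa [pvNhd] using hN⟩))
  · have hdl : 0 < done.length := List.length_pos_iff.mpr hd
    have hprev : pvCharAt (done ++ a :: b :: rest) ((done.length : Int) - 1) = done.getLast hd :=
      pvCharAt_prev done _ hd
    have hlast : pvAlphaLast done = PySem.Chars.isalpha (done.getLast hd) := pvAlphaLast_ne done hd
    rw [hprev]
    cases rest with
    | nil =>
      have hend : pvCharAt (done ++ [a, b]) ((done.length : Int) + 2) = ' ' := pvCharAt_end done a b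
      rw [hend]
      constructor
      · rintro (hlen | ((⟨h0, -⟩ | ⟨-, hL⟩) | ⟨hL, -⟩))
        · exfalso; simp only [List.length_append, List.length_cons, List.length_nil] at hlen; omega
        · exfalso; omega
        · exact ⟨by rw [hlast]; simpa using hL, rfl⟩
        · exact ⟨by rw [hlast]; simpa using hL, rfl⟩
      · rintro ⟨hP, -⟩
        refine Or.inr (Or.inl (Or.inr ⟨by simp, ?_⟩))
        rw [hlast] at hP; simpa using hP
    | cons c r =>
      have hnext : pvCharAt (done ++ a :: b :: c :: r) ((done.length : Int) + 2) = c :=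
        pvCharAt_next done a b c r
      rw [hnext]
      constructor
      · rintro (hlen | ((⟨h0, -⟩ | ⟨hlen2, -⟩) | ⟨hL, hc⟩))
        · exfalso; simp only [List.length_append, List.length_cons] at hlen; omega
        · exfalso; omega
        · exfalso; simp only [List.length_append, List.length_cons] at hlen2;
            push_cast at hlen2; omega
        · exact ⟨by rw [hlast]; simpa using hL, by simpa [pvNhd] using hc⟩
      · rintro ⟨hP, hN⟩
        exact Or.inr (Or.inr ⟨by rw [hlast] at hP; simpa using hP, by simpa [pvNhd] using hN⟩)

lemma pvSliceTwo (done : List Char) (a b : Char) (rest : List Char) :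
    PySem.List.slice (done ++ a :: b :: rest) (some (done.length : Int))
      (some ((done.length : Int) + 2)) = [a, b] := by
  have h2 : (done.length : Int) + 2 = ((done.length + 2 : Nat) : Int) := by push_cast; ring
  rw [h2, PySem.List.slice_natCast, List.drop_left]
  have h3 : done.length + 2 - done.length = 2 := by omega
  rw [h3]
  rfl

lemma pvSlicePrefix (done : List Char) (a b : Char) (rest : List Char) :
    PySem.List.slice (done ++ a :: b :: rest) (some 0) (some ((done.length : Int) + 2)) =
      done ++ [a, b] := by
  have h2 : (done.length : Int) + 2 = ((done.length + 2 : Nat) : Int) := by push_cast; ring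
  rw [PySem.List.slice_zero_start, h2, PySem.List.slice_to_natCast]
  rw [List.take_append]
  have h3 : done.length + 2 - done.length = 2 := by omega
  rw [h3, List.take_of_length_le (by omega)]
  simp

lemma pvSliceSuffix (done : List Char) (a b : Char) (rest : List Char) :
    PySem.List.slice (done ++ a :: b :: rest) (some ((done.length : Int) + 2)) none = rest := by
  have h2 : (done.length : Int) + 2 = ((done.length + 2 : Nat) : Int) := by push_cast; ring
  rw [h2, PySem.List.slice_from_natCast]
  rw [List.drop_append]
  have h3 : done.length + 2 - done.length = 2 := by omega
  rw [h3, List.drop_eq_nil_of_le (by omega)]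
  simp

lemma pvLoopAux : ∀ (n : Nat) (cs done : List Char), cs.length ≤ n →
    notReplaceLoop (done ++ cs) done.length = done ++ pvScan (pvAlphaLast done) cs := by
  intro n
  induction n with
  | zero =>
    intro cs done hl
    have : cs = [] := List.eq_nil_of_length_eq_zero (by omega)
    subst this
    rw [notReplaceLoop, dif_neg (by simp)]
    simp [pvScan]
  | succ n ih =>
    intro cs done hl
    rcases cs with _ | ⟨a, _ | ⟨b, rest⟩⟩
    · rw [notReplaceLoop, dif_neg (by simp)]
      simp [pvScan]
    · rw [notReplaceLoop, dif_neg (by simp)]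
      simp [pvScan]
    · rw [notReplaceLoop]
      have hg : ((done.length : Nat) : Int) < (((done ++ a :: b :: rest).length : Nat) : Int) - 1 := by
        simp only [List.length_append, List.length_cons]
        push_cast; omega
      rw [dif_pos hg]
      have hsl := pvSliceTwo done a b rest
      have hFullIff :
          ((PySem.List.slice (done ++ a :: b :: rest) (some (done.length : Int))
              (some ((done.length : Int) + 2)) = ['i', 's']) ∧
            ((done ++ a :: b :: rest).length = 2 ∨
              (((done.length = 0 ∧
                  ¬ (PySem.Chars.isalpha (pvCharAt (done ++ a :: b :: rest) ((done.length : Int) + 2)) = true)) ∨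
                 ((done.length : Int) = ((done ++ a :: b :: rest).length : Int) - 2 ∧
                  ¬ (PySem.Chars.isalpha (pvCharAt (done ++ a :: b :: rest) ((done.length : Int) - 1)) = true))) ∨
               (¬ (PySem.Chars.isalpha (pvCharAt (done ++ a :: b :: rest) ((done.length : Int) - 1)) = true) ∧
                ¬ (PySem.Chars.isalpha (pvCharAt (done ++ a :: b :: rest) ((done.length : Int) + 2)) = true))))) ↔
          (a = 'i' ∧ b = 's' ∧ pvAlphaLast done = false ∧ pvNhd rest = false) := by
        rw [hsl, pvOrIff]
        constructor
        · rintro ⟨h1, h2⟩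
          obtain ⟨ea, eb⟩ : a = 'i' ∧ b = 's' := by simpa using h1
          exact ⟨ea, eb, h2.1, h2.2⟩
        · rintro ⟨ea, eb, hP, hN⟩
          exact ⟨by simp [ea, eb], hP, hN⟩
      by_cases hsc : a = 'i' ∧ b = 's' ∧ pvAlphaLast done = false ∧ pvNhd rest = false
      · rw [if_pos (hFullIff.mpr hsc)]
        obtain ⟨ea, eb, hP, hN⟩ := hsc; subst ea; subst eb
        rw [pvSlicePrefix, pvSliceSuffix]
        have e1 : (done ++ ['i', 's']) ++ (' ' :: 'n' :: 'o' :: 't' :: []) ++ rest =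
            (done ++ ('i' :: 's' :: ' ' :: 'n' :: 'o' :: 't' :: [])) ++ rest := by simp
        have e2 : done.length + 6 = (done ++ ('i' :: 's' :: ' ' :: 'n' :: 'o' :: 't' :: [])).length := by
          simp
        rw [e1, e2, ih rest (done ++ ('i' :: 's' :: ' ' :: 'n' :: 'o' :: 't' :: []))
          (by simp at hl; omega)]
        rw [pvAlphaLast_append done _ (by simp)]
        have e3 : pvAlphaLast ('i' :: 's' :: ' ' :: 'n' :: 'o' :: 't' :: []) = true := by decide
        rw [e3]
        have e4 : pvScan (pvAlphaLast done) ('i' :: 's' :: rest) =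
            'i' :: 's' :: ' ' :: 'n' :: 'o' :: 't' :: pvScan true rest := by
          simp only [pvScan]; rw [if_pos ⟨by trivial, by trivial, hP, hN⟩]
        rw [e4]
        simp
      · rw [if_neg (fun h => hsc (hFullIff.mp h))]
        have e1 : done ++ a :: b :: rest = (done ++ [a]) ++ b :: rest := by simp
        have e2 : done.length + 1 = (done ++ [a]).length := by simp
        rw [e1, e2, ih (b :: rest) (done ++ [a]) (by simp at hl ⊢; omega)]
        rw [pvAlphaLast_append done [a] (by simp)]
        have e3 : pvAlphaLast [a] = PySem.Chars.isalpha a := by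
          unfold pvAlphaLast; rfl
        rw [e3]
        have e4 : pvScan (pvAlphaLast done) (a :: b :: rest) =
            a :: pvScan (PySem.Chars.isalpha a) (b :: rest) := by
          simp only [pvScan]; rw [if_neg (by tauto)]
        rw [e4]
        simp

lemma pvLoopEq (cs : List Char) :
    notReplaceLoop cs 0 = pvScan false cs := by
  have h := pvLoopAux cs.length cs [] le_rfl
  simpa [pvAlphaLast] using h

-- ===== VERDICT =====
theorem notReplace_spec : Claim_equal_notReplace := by
  intro str1 _
  unfold Spec_notReplace notReplace notReplace_alt
  have hB := pvAltEq str1.toList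
  unfold pvFinish at hB
  simp only [pvLoopEq, pvScanFalse, hB]
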